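-- pv_equiv track=rewrite | github.com/Tomas-Ferreyra/Melting-dynamics | Height_analysis.py | track2d
-- ===== SOURCE A (Python) =====
-- def track2d(mxs,mys,tts, delim=5, dtm=1):
--     partsx, partsy = [],[]
--     tiemps = []
--
--     for i in range(len(mxs)):
--
--         pacx,pacy,tac = mxs[i],mys[i],tts[i]
--
--         for k in range(len(partsx)):
--
--             ptrx, ptry, ttr = partsx[k][-1], partsy[k][-1], tiemps[k][-1]
--             dist = (ptrx - pacx)**2 + (ptry - pacy)**2
--
--             if dist < delim**2 and (tac-ttr) < dtm:  #and (tac-ttr)>0: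
--                 partsx[k].append(pacx)
--                 partsy[k].append(pacy)
--                 tiemps[k].append(tac)
--                 break
--         else:
--             partsx.append([pacx])
--             partsy.append([pacy])
--             tiemps.append([tac])
--
--     return partsx,partsy,tiemps
-- ===== SOURCE B (Python) =====
-- def track2d(mxs, mys, tts, delim=5, dtm=1):
--     # Two-phase: (1) one pass over the points keeping only each track's head
--     # (last point) computes an assignment point -> track id; (2) the three
--     # output lists are reconstructed per track from the assignment.
--     heads = []   # (x, y, t): last point of each track, indexed by track id
--     asg = []     # track id assigned to each point, in point order
--     for x, y, t in zip(mxs, mys, tts):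
--         for j, (hx, hy, ht) in enumerate(heads):
--             if (hx - x) ** 2 + (hy - y) ** 2 < delim ** 2 and t - ht < dtm:
--                 heads[j] = (x, y, t)
--                 asg.append(j)
--                 break
--         else:
--             asg.append(len(heads))
--             heads.append((x, y, t))
--     K = len(heads)
--     partsx = [[x for a, x in zip(asg, mxs) if a == j] for j in range(K)]
--     partsy = [[y for a, y in zip(asg, mys) if a == j] for j in range(K)]
--     tiemps = [[t for a, t in zip(asg, tts) if a == j] for j in range(K)]
--     return partsx, partsy, tiemps
-- ===== Notes on version B (the rewrite author's own statement) =====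
-- stated objective: alternative
-- what changed: B separates association from construction: a single pass keeps only each track's head (last point) as a flat list of triples and records a point-to-track-id assignment, then the three output lists are rebuilt per track id from that assignment, instead of A's growing nested lists mutated in place with last-element indexing.
import Mathlib
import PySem

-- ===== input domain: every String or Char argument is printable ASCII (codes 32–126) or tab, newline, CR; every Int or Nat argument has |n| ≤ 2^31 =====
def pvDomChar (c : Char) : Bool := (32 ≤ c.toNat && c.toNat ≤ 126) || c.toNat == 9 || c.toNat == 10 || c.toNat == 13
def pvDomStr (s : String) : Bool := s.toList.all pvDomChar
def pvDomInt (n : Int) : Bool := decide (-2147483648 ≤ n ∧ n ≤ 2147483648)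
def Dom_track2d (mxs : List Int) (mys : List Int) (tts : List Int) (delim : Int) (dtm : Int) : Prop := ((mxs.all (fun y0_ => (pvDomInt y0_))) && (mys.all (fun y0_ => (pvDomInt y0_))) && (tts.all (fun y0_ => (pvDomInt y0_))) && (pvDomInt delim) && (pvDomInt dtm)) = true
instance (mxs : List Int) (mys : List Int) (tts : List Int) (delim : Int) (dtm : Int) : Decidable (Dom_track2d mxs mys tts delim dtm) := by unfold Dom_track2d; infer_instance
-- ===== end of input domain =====

-- B separates association from construction: one pass over the points keeps only each
-- track's head (last point) and records a point→track-id assignment, and the three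
-- output lists are rebuilt per track from that assignment (objective: alternative;
-- return-value equivalence — neither version mutates its arguments).

-- ===== PORT A =====
-- partsx[k][-1] on the always-nonempty per-track lists (exact where reachable)
def lastD (l : List Int) : Int := l.getLast?.getD 0

-- A's inner `for k … break/else`: scan the tracks in order, append the point to the
-- first matching one, or report none
def aAttach (pacx pacy tac delim dtm : Int) :
    List (List Int) → List (List Int) → List (List Int) →
    Option (List (List Int) × List (List Int) × List (List Int))
  | tx :: pxs, ty :: pys, tt :: tss =>
    if (lastD tx - pacx) ^ 2 + (lastD ty - pacy) ^ 2 < delim ^ 2 ∧ tac - lastD tt < dtm then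
      some ((tx ++ [pacx]) :: pxs, (ty ++ [pacy]) :: pys, (tt ++ [tac]) :: tss)
    else
      match aAttach pacx pacy tac delim dtm pxs pys tss with
      | some (a, b, c) => some (tx :: a, ty :: b, tt :: c)
      | none => none
  | _, _, _ => none

def aStep (delim dtm : Int)
    (st : List (List Int) × List (List Int) × List (List Int)) (p : Int × Int × Int) :
    List (List Int) × List (List Int) × List (List Int) :=
  match aAttach p.1 p.2.1 p.2.2 delim dtm st.1 st.2.1 st.2.2 with
  | some s => s
  | none => (st.1 ++ [[p.1]], st.2.1 ++ [[p.2.1]], st.2.2 ++ [[p.2.2]])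

def track2d (mxs : List Int) (mys : List Int) (tts : List Int) (delim : Int) (dtm : Int) : List (List (List Int)) :=
  -- A reads mxs[i], mys[i], tts[i] for i in range(len(mxs)); under Pre_ this is the zip
  let pts := mxs.zip (mys.zip tts)
  let st := pts.foldl (aStep delim dtm) ([], [], [])
  [st.1, st.2.1, st.2.2]

-- ===== PORT B =====
-- B's inner `for j, (hx,hy,ht) in enumerate(heads) … break/else`: first matching head
def bFind (x y t delim dtm : Int) : List (Int × Int × Int) → Option Nat
  | [] => none
  | h :: hs =>
    if (h.1 - x) ^ 2 + (h.2.1 - y) ^ 2 < delim ^ 2 ∧ t - h.2.2 < dtm then some 0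
    else (bFind x y t delim dtm hs).map (· + 1)

def bAssign (delim dtm : Int)
    (st : List (Int × Int × Int) × List Nat) (p : Int × Int × Int) :
    List (Int × Int × Int) × List Nat :=
  match bFind p.1 p.2.1 p.2.2 delim dtm st.1 with
  | some j => (st.1.set j p, st.2 ++ [j])
  | none => (st.1 ++ [p], st.2 ++ [st.1.length])

-- [x for a, x in zip(asg, xs) if a == j]
def grp (asg : List Nat) (xs : List Int) (j : Nat) : List Int :=
  (asg.zip xs).filterMap (fun ax => if ax.1 = j then some ax.2 else none)

def track2d_alt (mxs : List Int) (mys : List Int) (tts : List Int) (delim : Int) (dtm : Int) : List (List (List Int)) :=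
  let pts := mxs.zip (mys.zip tts)
  let hb := pts.foldl (bAssign delim dtm) ([], [])
  let K := hb.1.length
  [(List.range K).map (grp hb.2 mxs), (List.range K).map (grp hb.2 mys),
   (List.range K).map (grp hb.2 tts)]

-- ===== PRECONDITION & SPEC =====
-- A raises IndexError when mys or tts is shorter than mxs (it indexes both by
-- range(len(mxs))); Pre_ admits exactly the inputs on which A returns.
def Pre_track2d (mxs : List Int) (mys : List Int) (tts : List Int) (delim : Int) (dtm : Int) : Prop :=
  mxs.length ≤ mys.length ∧ mxs.length ≤ tts.length
instance (mxs : List Int) (mys : List Int) (tts : List Int) (delim : Int) (dtm : Int) : Decidable (Pre_track2d mxs mys tts delim dtm) := by unfold Pre_track2d; infer_instance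

def pvWitness_track2d : List Int × List Int × List Int × Int × Int :=
  ([0, 1, 10], [0, 0, 0], [0, 0, 0], 5, 1)

def Spec_track2d (mxs : List Int) (mys : List Int) (tts : List Int) (delim : Int) (dtm : Int) (out : List (List (List Int))) : Prop := out = track2d_alt mxs mys tts delim dtm
instance (mxs : List Int) (mys : List Int) (tts : List Int) (delim : Int) (dtm : Int) (out : List (List (List Int))) : Decidable (Spec_track2d mxs mys tts delim dtm out) := by unfold Spec_track2d; infer_instance

-- ===== CLAIM (what is proved, stated in full; the proofs are below) =====
def Claim_equal_track2d : Prop := ∀ (mxs : List Int) (mys : List Int) (tts : List Int) (delim : Int) (dtm : Int), Dom_track2d mxs mys tts delim dtm → Pre_track2d mxs mys tts delim dtm → Spec_track2d mxs mys tts delim dtm (track2d mxs mys tts delim dtm)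

-- ===== LEMMAS AND PROOFS =====

-- heads as A sees them: the last elements of the three per-track lists, zipped
def zip3lastD (px py ts : List (List Int)) : List (Int × Int × Int) :=
  (px.map lastD).zip ((py.map lastD).zip (ts.map lastD))

theorem lastD_append (l : List Int) (x : Int) : lastD (l ++ [x]) = x := by simp [lastD]

theorem bFind_lt {x y t delim dtm : Int} :
    ∀ {hs : List (Int × Int × Int)} {j : Nat}, bFind x y t delim dtm hs = some j → j < hs.length := by
  intro hs
  induction hs with
  | nil => intro j h; simp [bFind] at h
  | cons h hs ih =>
    intro j hj
    unfold bFind at hj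
    split at hj
    · simp only [Option.some.injEq] at hj
      simp [← hj]
    · cases hf : bFind x y t delim dtm hs with
      | none => rw [hf] at hj; simp at hj
      | some k => rw [hf] at hj; simp at hj; have := ih hf; simp; omega

-- A's inner scan is B's first-match search on the heads, followed by an append at
-- the found index
theorem attach_spec (x y t delim dtm : Int) :
    ∀ (px py ts : List (List Int)), px.length = py.length → px.length = ts.length →
    aAttach x y t delim dtm px py ts =
      (bFind x y t delim dtm (zip3lastD px py ts)).map
        (fun j => (px.modify j (· ++ [x]), py.modify j (· ++ [y]), ts.modify j (· ++ [t]))) := by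
  intro px
  induction px with
  | nil => intro py ts h1 h2; cases py <;> cases ts <;> rfl
  | cons tx pxs ih =>
    intro py ts h1 h2
    cases py with
    | nil => simp at h1
    | cons ty pys =>
      cases ts with
      | nil => simp at h2
      | cons tt tss =>
        simp only [aAttach, zip3lastD, List.map_cons, List.zip_cons_cons, bFind]
        split
        · simp [List.modify_cons]
        · rw [ih pys tss (by simpa using h1) (by simpa using h2)]
          cases hf : bFind x y t delim dtm (zip3lastD pxs pys tss) with
          | none => simp [zip3lastD] at hf; simp [hf]
          | some j => simp [zip3lastD] at hf; simp [hf, List.modify_cons]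

theorem zip_take_self {α β : Type} : ∀ (a : List α) (b : List β), a.zip b = a.zip (b.take a.length) := by
  intro a
  induction a with
  | nil => intro b; simp
  | cons x xs ih =>
    intro b
    cases b with
    | nil => simp
    | cons y ys =>
      simp only [List.length_cons, List.take_succ_cons, List.zip_cons_cons]
      rw [← ih]

theorem grp_append (asg : List Nat) (xs : List Int) (a : Nat) (x : Int) (j : Nat)
    (h : asg.length = xs.length) :
    grp (asg ++ [a]) (xs ++ [x]) j = grp asg xs j ++ (if a = j then [x] else []) := by
  unfold grp
  rw [List.zip_append h, List.filterMap_append]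
  simp only [List.zip_cons_cons, List.zip_nil_right]
  split <;> simp_all

theorem grp_oob (asg : List Nat) (xs : List Int) (j : Nat)
    (h : ∀ a ∈ asg, a < j) : grp asg xs j = [] := by
  unfold grp
  rw [List.filterMap_eq_nil_iff]
  intro ax hax
  have : ax.1 ∈ asg := (List.of_mem_zip hax).1
  have : ax.1 ≠ j := by have := h _ this; omega
  simp [this]

theorem zip3lastD_modify :
    ∀ (px py ts : List (List Int)) (j : Nat) (x y t : Int), px.length = py.length → px.length = ts.length →
    zip3lastD (px.modify j (· ++ [x])) (py.modify j (· ++ [y])) (ts.modify j (· ++ [t]))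
      = (zip3lastD px py ts).set j (x, y, t) := by
  intro px
  induction px with
  | nil =>
    intro py ts j x y t h1 h2
    cases py <;> cases ts <;> simp_all [zip3lastD]
  | cons tx pxs ih =>
    intro py ts j x y t h1 h2
    cases py with
    | nil => simp at h1
    | cons ty pys =>
      cases ts with
      | nil => simp at h2
      | cons tt tss =>
        cases j with
        | zero => simp [zip3lastD, List.modify_cons, lastD_append]
        | succ j =>
          simp only [zip3lastD, List.modify_cons, List.map_cons, List.zip_cons_cons,
            Nat.succ_ne_zero, if_false, List.set_cons_succ, Nat.add_sub_cancel]
          refine congrArg _ ?_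
          exact ih pys tss j x y t (by simpa using h1) (by simpa using h2)

theorem zip3lastD_append (px py ts : List (List Int)) (x y t : Int)
    (h1 : px.length = py.length) (h2 : px.length = ts.length) :
    zip3lastD (px ++ [[x]]) (py ++ [[y]]) (ts ++ [[t]])
      = zip3lastD px py ts ++ [(x, y, t)] := by
  unfold zip3lastD
  rw [List.map_append, List.map_append, List.map_append,
      List.zip_append (show (py.map lastD).length = (ts.map lastD).length by simp; omega),
      List.zip_append (show (px.map lastD).length = ((py.map lastD).zip (ts.map lastD)).length by simp; omega)]
  simp [lastD]

-- loop invariant: B's heads are the last points of A's tracks, and A's tracks are the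
-- per-id groups of B's assignment over the processed prefix
def TrkInv (done : List (Int × Int × Int))
    (st : List (List Int) × List (List Int) × List (List Int))
    (bst : List (Int × Int × Int) × List Nat) : Prop :=
  bst.2.length = done.length ∧
  (∀ a ∈ bst.2, a < bst.1.length) ∧
  st.1.length = bst.1.length ∧ st.2.1.length = bst.1.length ∧ st.2.2.length = bst.1.length ∧
  bst.1 = zip3lastD st.1 st.2.1 st.2.2 ∧
  st.1 = (List.range bst.1.length).map (fun j => grp bst.2 (done.map (·.1)) j) ∧
  st.2.1 = (List.range bst.1.length).map (fun j => grp bst.2 (done.map (·.2.1)) j) ∧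
  st.2.2 = (List.range bst.1.length).map (fun j => grp bst.2 (done.map (·.2.2)) j)

-- one output column after appending point p with assignment a
theorem grp_cols (done : List (Int × Int × Int)) (asg : List Nat) (a : Nat) (p : Int × Int × Int)
    (f : Int × Int × Int → Int) (j : Nat) (h : asg.length = done.length) :
    grp (asg ++ [a]) ((done ++ [p]).map f) j
      = grp asg (done.map f) j ++ (if a = j then [f p] else []) := by
  rw [List.map_append]
  exact grp_append asg (done.map f) a (f p) j (by simpa using h)

theorem step_inv (delim dtm : Int) (done : List (Int × Int × Int)) (p : Int × Int × Int)
    (st : List (List Int) × List (List Int) × List (List Int))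
    (bst : List (Int × Int × Int) × List Nat) (h : TrkInv done st bst) :
    TrkInv (done ++ [p]) (aStep delim dtm st p) (bAssign delim dtm bst p) := by
  obtain ⟨px, py, ts⟩ := st
  obtain ⟨heads, asg⟩ := bst
  obtain ⟨hlen, hmem, hl1, hl2, hl3, hheads, hx, hy, ht⟩ := h
  simp only at hlen hmem hl1 hl2 hl3 hheads hx hy ht
  have hspec := attach_spec p.1 p.2.1 p.2.2 delim dtm px py ts (by omega) (by omega)
  rw [← hheads] at hspec
  unfold aStep bAssign
  simp only
  cases hf : bFind p.1 p.2.1 p.2.2 delim dtm heads with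
  | some j =>
    have hj : j < heads.length := bFind_lt hf
    rw [hspec, hf]
    simp only [Option.map_some]
    refine ⟨by simp [hlen], ?_, by simp [hl1], by simp [hl2], by simp [hl3], ?_, ?_, ?_, ?_⟩
    · intro a ha
      simp only [List.length_set]
      rcases List.mem_append.mp ha with h' | h'
      · exact hmem a h'
      · simp at h'; omega
    · rw [zip3lastD_modify px py ts j p.1 p.2.1 p.2.2 (by omega) (by omega), ← hheads]
    · -- x column
      simp only [List.length_set]
      rw [hx]
      refine List.ext_getElem (by simp) ?_
      intro i hi1 hi2
      have hiK : i < heads.length := by simpa using hi1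
      simp only [List.getElem_modify, List.getElem_map, List.getElem_range]
      rw [grp_cols done asg j p (·.1) i (by omega)]
      by_cases heq : j = i
      · subst heq; simp
      · simp [heq]
    · -- y column
      simp only [List.length_set]
      rw [hy]
      refine List.ext_getElem (by simp) ?_
      intro i hi1 hi2
      have hiK : i < heads.length := by simpa using hi1
      simp only [List.getElem_modify, List.getElem_map, List.getElem_range]
      rw [grp_cols done asg j p (·.2.1) i (by omega)]
      by_cases heq : j = i
      · subst heq; simp
      · simp [heq]
    · -- t column
      simp only [List.length_set]
      rw [ht]
      refine List.ext_getElem (by simp) ?_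
      intro i hi1 hi2
      have hiK : i < heads.length := by simpa using hi1
      simp only [List.getElem_modify, List.getElem_map, List.getElem_range]
      rw [grp_cols done asg j p (·.2.2) i (by omega)]
      by_cases heq : j = i
      · subst heq; simp
      · simp [heq]
  | none =>
    rw [hspec, hf]
    simp only [Option.map_none]
    have hKcol : ∀ (f : Int × Int × Int → Int),
        (List.range (heads.length + 1)).map (fun j => grp (asg ++ [heads.length]) ((done ++ [p]).map f) j)
          = (List.range heads.length).map (fun j => grp asg (done.map f) j) ++ [[f p]] := by
      intro f
      rw [List.range_succ, List.map_append]
      congr 1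
      · refine List.map_congr_left ?_
        intro j hj
        have hj' : j < heads.length := List.mem_range.mp hj
        rw [grp_cols done asg heads.length p f j (by omega)]
        have : heads.length ≠ j := by omega
        simp [this]
      · simp only [List.map_cons, List.map_nil]
        rw [grp_cols done asg heads.length p f heads.length (by omega)]
        rw [grp_oob asg (done.map f) heads.length hmem]
        simp
    refine ⟨by simp [hlen], ?_, by simp [hl1], by simp [hl2], by simp [hl3], ?_, ?_, ?_, ?_⟩
    · intro a ha
      simp only [List.length_append, List.length_cons, List.length_nil]
      rcases List.mem_append.mp ha with h' | h'
      · have := hmem a h'; omega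
      · simp at h'; omega
    · rw [zip3lastD_append px py ts p.1 p.2.1 p.2.2 (by omega) (by omega), ← hheads]
    · simp only [List.length_append, List.length_cons, List.length_nil, Nat.zero_add]
      rw [hKcol (·.1), ← hx]
    · simp only [List.length_append, List.length_cons, List.length_nil, Nat.zero_add]
      rw [hKcol (·.2.1), ← hy]
    · simp only [List.length_append, List.length_cons, List.length_nil, Nat.zero_add]
      rw [hKcol (·.2.2), ← ht]

theorem fold_inv (delim dtm : Int) :
    ∀ (pts done : List (Int × Int × Int)) st bst, TrkInv done st bst →
      TrkInv (done ++ pts) (pts.foldl (aStep delim dtm) st) (pts.foldl (bAssign delim dtm) bst) := by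
  intro pts
  induction pts with
  | nil => intro done st bst h; simpa using h
  | cons p rest ih =>
    intro done st bst h
    have := ih (done ++ [p]) _ _ (step_inv delim dtm done p st bst h)
    simpa using this

theorem grp_take (asg : List Nat) (xs : List Int) (j : Nat) :
    grp asg xs j = grp asg (xs.take asg.length) j := by
  unfold grp
  conv_lhs => rw [zip_take_self asg xs]

theorem proj3 :
    ∀ (mxs mys tts : List Int), mxs.length ≤ mys.length → mxs.length ≤ tts.length →
    ((mxs.zip (mys.zip tts)).map (·.1) = mxs ∧
     (mxs.zip (mys.zip tts)).map (·.2.1) = mys.take mxs.length ∧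
     (mxs.zip (mys.zip tts)).map (·.2.2) = tts.take mxs.length) := by
  intro mxs
  induction mxs with
  | nil => intro mys tts _ _; simp
  | cons x xs ih =>
    intro mys tts h1 h2
    cases mys with
    | nil => simp at h1
    | cons y ys =>
      cases tts with
      | nil => simp at h2
      | cons t ts =>
        obtain ⟨a, b, c⟩ := ih ys ts (by simpa using h1) (by simpa using h2)
        simp [a, b, c]

theorem final_eq (mxs mys tts : List Int) (delim dtm : Int)
    (hpre : mxs.length ≤ mys.length ∧ mxs.length ≤ tts.length) :
    track2d mxs mys tts delim dtm = track2d_alt mxs mys tts delim dtm := by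
  obtain ⟨hp1, hp2⟩ := hpre
  unfold track2d track2d_alt
  have hinv := fold_inv delim dtm (mxs.zip (mys.zip tts)) [] ([], [], []) ([], [])
    ⟨rfl, by simp, rfl, rfl, rfl, rfl, by simp, by simp, by simp⟩
  rw [List.nil_append] at hinv
  set pts := mxs.zip (mys.zip tts) with hpts
  obtain ⟨hlen, hmem, hl1, hl2, hl3, hheads, hx, hy, ht⟩ := hinv
  set st := pts.foldl (aStep delim dtm) ([], [], []) with hst
  set hb := pts.foldl (bAssign delim dtm) ([], []) with hhb
  have hptslen : pts.length = mxs.length := by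
    rw [hpts]; simp; omega
  obtain ⟨pa, pb, pc⟩ := proj3 mxs mys tts hp1 hp2
  have halen : hb.2.length = mxs.length := by omega
  show [st.1, st.2.1, st.2.2] =
    [(List.range hb.1.length).map (grp hb.2 mxs), (List.range hb.1.length).map (grp hb.2 mys),
     (List.range hb.1.length).map (grp hb.2 tts)]
  have e1 : st.1 = (List.range hb.1.length).map (grp hb.2 mxs) := by
    rw [hx]
    refine List.map_congr_left ?_
    intro j _
    show grp hb.2 (pts.map (·.1)) j = grp hb.2 mxs j
    rw [hpts, pa]
  have e2 : st.2.1 = (List.range hb.1.length).map (grp hb.2 mys) := by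
    rw [hy]
    refine List.map_congr_left ?_
    intro j _
    show grp hb.2 (pts.map (·.2.1)) j = grp hb.2 mys j
    rw [hpts, pb, grp_take hb.2 mys j, halen]
  have e3 : st.2.2 = (List.range hb.1.length).map (grp hb.2 tts) := by
    rw [ht]
    refine List.map_congr_left ?_
    intro j _
    show grp hb.2 (pts.map (·.2.2)) j = grp hb.2 tts j
    rw [hpts, pc, grp_take hb.2 tts j, halen]
  rw [e1, e2, e3]

-- ===== VERDICT (by name: the statement is the Claim_ definition above) =====
theorem track2d_spec : Claim_equal_track2d := by
  intro mxs mys tts delim dtm _ hpre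
  unfold Pre_track2d at hpre
  unfold Spec_track2d
  exact final_eq mxs mys tts delim dtm hpre
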